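-- pv_equiv track=rewrite | github.com/xprime480/projects | tools/misc/decommenter.py | skip_string
-- ===== SOURCE A (Python) =====
-- def skip_string(i, size, text, delim) :
--     """Skip the rest of a string returning the end position."""
--
--     while i < size :
--         c = text[i]
--         if c == '\\' :
--             i += 2
--         elif c == delim :
--             return i+1
--         else :
--             i += 1
--
--     return i
-- ===== SOURCE B (Python) =====
-- def skip_string(i, size, text, delim):
--     """Skip the rest of a string returning the end position.
--
--     Instead of stepping one character at a time, jump with str.find to the
--     next backslash / delimiter position below `size` (escapes win ties)."""
--     while True:
--         b = text.find('\\', i)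
--         if b < 0 or b >= size:
--             b = -1
--         d = text.find(delim, i)
--         if d < 0 or d >= size:
--             d = -1
--         if b >= 0 and (d < 0 or b <= d):
--             i = b + 2
--         elif d >= 0:
--             return d + 1
--         else:
--             return size if i < size else i
-- ===== Notes on version B (the rewrite author's own statement) =====
-- stated objective: alternative
-- what changed: Replaces the char-by-char while loop with a skip-ahead traversal: each step uses str.find to jump directly to the next backslash or delimiter below size (escape wins ties), instead of inspecting every character.
-- outside the precondition, e.g. on skip_string(-1, 1, 'x', 'x'): A returns 0, B returns 1; on skip_string(0, 2, 'ab', 'ab'): A returns 2, B returns 1; on skip_string(0, 5, 'a"b', '"'): A returns 2, B returns 2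
import Mathlib
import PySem

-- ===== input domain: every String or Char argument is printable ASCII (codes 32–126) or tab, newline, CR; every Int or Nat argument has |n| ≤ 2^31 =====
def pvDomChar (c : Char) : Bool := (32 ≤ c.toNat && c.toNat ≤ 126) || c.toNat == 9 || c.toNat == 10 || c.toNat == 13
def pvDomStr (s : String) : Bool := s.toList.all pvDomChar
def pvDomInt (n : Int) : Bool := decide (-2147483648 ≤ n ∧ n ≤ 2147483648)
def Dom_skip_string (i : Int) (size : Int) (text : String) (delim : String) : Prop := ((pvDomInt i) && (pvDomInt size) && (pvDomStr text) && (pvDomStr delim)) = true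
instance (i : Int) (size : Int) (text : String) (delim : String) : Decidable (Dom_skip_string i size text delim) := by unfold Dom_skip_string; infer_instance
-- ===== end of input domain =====

-- B replaces A's char-by-char while loop by a skip-ahead traversal using str.find
-- (jump to the next backslash/delimiter below size; escape wins ties); same cost class.

-- ===== PORT A =====
def skip_string (i : Int) (size : Int) (text : String) (delim : String) : Int :=
  if h : i < size then
    match PySem.Str.pyGet? text i with
    | none => i          -- Python raises IndexError here; such inputs are outside Pre_
    | some c =>
      if String.ofList [c] = "\\" then skip_string (i + 2) size text delim
      else if String.ofList [c] = delim then i + 1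
      else skip_string (i + 1) size text delim
  else i
termination_by (size - i).toNat
decreasing_by all_goals omega

-- ===== PORT B =====
-- b = text.find('\\', i) clipped to -1 when < 0 or >= size (and likewise d)
def pvClip (size v : Int) : Int := if v < 0 ∨ size ≤ v then -1 else v

def skip_string_alt (i : Int) (size : Int) (text : String) (delim : String) : Int :=
  let b := pvClip size (PySem.Str.findFrom text "\\" i)
  let d := pvClip size (PySem.Str.findFrom text delim i)
  if hb : 0 ≤ b ∧ (d < 0 ∨ b ≤ d) then
    if h2 : i < b + 2 then skip_string_alt (b + 2) size text delim
    else i               -- never reached on the 0 ≤ i inputs Pre_ admits; termination guard only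
  else if 0 ≤ d then d + 1
  else if i < size then size else i
termination_by (size + 2 - i).toNat
decreasing_by
  obtain ⟨hb0, -⟩ := hb
  simp only [b, pvClip] at hb0 h2 ⊢
  split_ifs at hb0 <;> omega

-- ===== PRECONDITION & SPEC =====
-- Pre_ admits any input with size ≤ i (the loop never runs) and otherwise excludes:
-- negative start index i (an index into text is naturally ≥ 0; Python's negative-index
-- wraparound there is outside the scanner's domain), size > len(text) (A can raise
-- IndexError there), and delim not a single character (A compares one char, so a
-- multi-char delim can never match; B's str.find would match it as a substring).
def Pre_skip_string (i : Int) (size : Int) (text : String) (delim : String) : Prop :=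
  (0 ≤ i ∧ size ≤ (text.toList.length : Int) ∧ delim.toList.length = 1) ∨ size ≤ i
instance (i : Int) (size : Int) (text : String) (delim : String) : Decidable (Pre_skip_string i size text delim) := by unfold Pre_skip_string; infer_instance

def pvWitness_skip_string : Int × Int × String × String := (0, 3, "a\"b", "\"")

def Spec_skip_string (i : Int) (size : Int) (text : String) (delim : String) (out : Int) : Prop := out = skip_string_alt i size text delim
instance (i : Int) (size : Int) (text : String) (delim : String) (out : Int) : Decidable (Spec_skip_string i size text delim out) := by unfold Spec_skip_string; infer_instance

-- ===== CLAIM (what is proved, stated in full; the proofs are below) =====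
def Claim_equal_skip_string : Prop := ∀ (i : Int) (size : Int) (text : String) (delim : String), Dom_skip_string i size text delim → Pre_skip_string i size text delim → Spec_skip_string i size text delim (skip_string i size text delim)

-- ===== LEMMAS AND PROOFS =====

lemma pv_prefix_singleton_iff (ch : Char) (l : List Char) : [ch] <+: l ↔ l.head? = some ch := by
  cases l with
  | nil => simp
  | cons a t => simp [List.cons_prefix_cons, eq_comm]

-- findFrom with a start past the length is -1
lemma pv_ff_gt_len (cs sub : List Char) (i : Int) (hi : (cs.length : Int) < i) :
    PySem.Chars.findFrom cs sub i none = -1 := by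
  have h0 : (0:Int) ≤ cs.length := Int.natCast_nonneg _
  simp only [PySem.Chars.findFrom]
  split_ifs <;> omega

-- a non-(-1) findFrom result is ≥ the (nonnegative) start and points at an occurrence
lemma pv_ff_lb (cs sub : List Char) (i : Int) (hi : 0 ≤ i)
    (hne : PySem.Chars.findFrom cs sub i none ≠ -1) :
    i ≤ PySem.Chars.findFrom cs sub i none ∧
      sub <+: cs.drop (PySem.Chars.findFrom cs sub i none).toNat := by
  by_cases hle : i ≤ (cs.length : Int)
  · have hk : i.toNat ≤ cs.length := by omega
    have hcast : ((i.toNat : Int)) = i := Int.toNat_of_nonneg hi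
    have := PySem.Chars.findFrom_natCast_spec cs sub i.toNat hk (by rw [hcast]; exact hne)
    rw [hcast] at this
    exact ⟨this.1, this.2.1⟩
  · exact absurd (pv_ff_gt_len cs sub i (by omega)) hne

lemma pv_find_singleton_zero (ch : Char) (l : List Char) (h : l.head? = some ch) :
    PySem.Chars.find l [ch] = 0 := by
  have hpre : [ch] <+: l := (pv_prefix_singleton_iff ch l).mpr h
  have hnn : 0 ≤ PySem.Chars.find l [ch] :=
    (PySem.Chars.find_nonneg_iff l [ch]).mpr hpre.isInfix
  have hspec := PySem.Chars.find_spec hnn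
  by_contra hne
  have hpos : 0 < (PySem.Chars.find l [ch]).toNat := by omega
  exact hspec.2 0 hpos (by simpa using hpre)

lemma pv_find_singleton_cons_ne (ch c : Char) (l : List Char) (h : c ≠ ch) :
    PySem.Chars.find (c :: l) [ch]
      = if PySem.Chars.find l [ch] = -1 then -1 else PySem.Chars.find l [ch] + 1 := by
  by_cases h2 : PySem.Chars.find l [ch] = -1
  · rw [if_pos h2]
    have hni : ¬ [ch] <:+: l := (PySem.Chars.find_eq_neg_one_iff l [ch]).mp h2
    refine (PySem.Chars.find_eq_neg_one_iff _ _).mpr ?_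
    intro hin
    rcases (List.singleton_infix_iff ch (c :: l)).mp hin with hm
    rcases List.mem_cons.mp hm with rfl | hm2
    · exact h rfl
    · exact hni ((List.singleton_infix_iff ch l).mpr hm2)
  · rw [if_neg h2]
    have hnn2 : 0 ≤ PySem.Chars.find l [ch] := by
      have := PySem.Chars.neg_one_le_find l [ch]; omega
    have hspec2 := PySem.Chars.find_spec hnn2
    set f2 := PySem.Chars.find l [ch] with hf2
    have hmem : ch ∈ l := by
      have := hspec2.1
      have hh := (pv_prefix_singleton_iff ch _).mp this
      have : ch ∈ l.drop f2.toNat := List.mem_of_mem_head? hh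
      exact List.mem_of_mem_drop this
    have hnn1 : 0 ≤ PySem.Chars.find (c :: l) [ch] :=
      (PySem.Chars.find_nonneg_iff _ _).mpr
        ((List.singleton_infix_iff ch (c :: l)).mpr (List.mem_cons_of_mem c hmem))
    have hspec1 := PySem.Chars.find_spec hnn1
    set f1 := PySem.Chars.find (c :: l) [ch] with hf1
    have hne0 : f1.toNat ≠ 0 := by
      intro h0
      have := hspec1.1
      rw [h0] at this
      simp only [List.drop_zero] at this
      have := (pv_prefix_singleton_iff ch _).mp this
      simp at this
      exact h this
    -- f2.toNat ≤ f1.toNat - 1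
    have hub : f1.toNat ≤ f2.toNat + 1 := by
      by_contra hlt
      rw [not_le] at hlt
      have := hspec1.2 (f2.toNat + 1) hlt
      rw [List.drop_succ_cons] at this
      exact this hspec2.1
    have hlb : f2.toNat + 1 ≤ f1.toNat := by
      by_contra hlt
      rw [not_le] at hlt
      have h1 : f1.toNat - 1 < f2.toNat := by omega
      have := hspec2.2 (f1.toNat - 1) h1
      apply this
      obtain ⟨m, hm⟩ : ∃ m, f1.toNat = m + 1 := ⟨f1.toNat - 1, by omega⟩
      have hdrop : (c :: l).drop f1.toNat = l.drop (f1.toNat - 1) := by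
        rw [hm, List.drop_succ_cons]
        simp
      rw [← hdrop]
      exact hspec1.1
    omega

-- findFrom hits the start position when the char is there
lemma pv_ff_hit (cs : List Char) (ch : Char) (k : Nat) (hk : k < cs.length)
    (hc : cs[k]? = some ch) : PySem.Chars.findFrom cs [ch] (k : Int) none = (k : Int) := by
  rw [PySem.Chars.findFrom_natCast cs [ch] k (le_of_lt hk)]
  have hh : (cs.drop k).head? = some ch := by rw [List.head?_drop]; exact hc
  rw [pv_find_singleton_zero ch _ hh]
  norm_num

-- findFrom skips a non-matching start position
lemma pv_ff_step (cs : List Char) (ch : Char) (k : Nat) (hk : k < cs.length)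
    (hc : cs[k]? ≠ some ch) :
    PySem.Chars.findFrom cs [ch] (k : Int) none = PySem.Chars.findFrom cs [ch] ((k : Int) + 1) none := by
  have hcast : ((k : Int) + 1) = ((k + 1 : Nat) : Int) := by push_cast; ring
  rw [hcast, PySem.Chars.findFrom_natCast cs [ch] k (le_of_lt hk),
      PySem.Chars.findFrom_natCast cs [ch] (k + 1) hk]
  have hdrop : cs.drop k = cs[k] :: cs.drop (k + 1) := List.drop_eq_getElem_cons hk
  have hne : cs[k] ≠ ch := by
    intro he
    exact hc (by rw [List.getElem?_eq_getElem hk, he])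
  rw [hdrop, pv_find_singleton_cons_ne ch cs[k] _ hne]
  have := PySem.Chars.neg_one_le_find (cs.drop (k + 1)) [ch]
  by_cases h1 : PySem.Chars.find (cs.drop (k + 1)) [ch] = -1
  · simp [h1]
  · rw [if_neg h1, if_neg (by omega), if_neg h1]
    push_cast
    ring

lemma pv_clip_nonneg (size v : Int) (h : 0 ≤ pvClip size v) :
    pvClip size v = v ∧ 0 ≤ v ∧ v < size := by
  unfold pvClip at h ⊢; split_ifs at h ⊢ with hc
  · omega
  · omega

lemma pv_clip_neg (size v : Int) (h : v < 0 ∨ size ≤ v) : pvClip size v = -1 := by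
  unfold pvClip; split_ifs <;> omega

lemma pv_clip_in (size v : Int) (h1 : 0 ≤ v) (h2 : v < size) : pvClip size v = v := by
  unfold pvClip; split_ifs <;> omega

lemma pv_ofList_singleton_eq_iff (c ch : Char) :
    String.ofList [c] = String.ofList [ch] ↔ c = ch := by
  constructor
  · intro h
    have := congrArg String.toList h
    simpa using this
  · intro h; rw [h]

lemma pv_alt_unfold (i size b d : Int) (text delim : String)
    (hb : pvClip size (PySem.Str.findFrom text "\\" i) = b)
    (hdl : pvClip size (PySem.Str.findFrom text delim i) = d) :
    skip_string_alt i size text delim =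
      if 0 ≤ b ∧ (d < 0 ∨ b ≤ d) then
        (if i < b + 2 then skip_string_alt (b + 2) size text delim else i)
      else if 0 ≤ d then d + 1
      else if i < size then size else i := by
  subst hb; subst hdl
  rw [skip_string_alt]
  simp only [dite_eq_ite]

lemma pv_alt_escape (i size b d : Int) (text delim : String)
    (hb : pvClip size (PySem.Str.findFrom text "\\" i) = b)
    (hdl : pvClip size (PySem.Str.findFrom text delim i) = d)
    (h1 : 0 ≤ b) (h2 : d < 0 ∨ b ≤ d) (h3 : i < b + 2) :
    skip_string_alt i size text delim = skip_string_alt (b + 2) size text delim := by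
  rw [pv_alt_unfold i size b d text delim hb hdl]
  have hc : 0 ≤ b ∧ (d < 0 ∨ b ≤ d) := ⟨h1, h2⟩
  rw [if_pos hc, if_pos h3]

lemma pv_alt_delim (i size b d : Int) (text delim : String)
    (hb : pvClip size (PySem.Str.findFrom text "\\" i) = b)
    (hdl : pvClip size (PySem.Str.findFrom text delim i) = d)
    (h1 : 0 ≤ d) (h2 : b < 0 ∨ d < b) :
    skip_string_alt i size text delim = d + 1 := by
  rw [pv_alt_unfold i size b d text delim hb hdl]
  have hc : ¬ (0 ≤ b ∧ (d < 0 ∨ b ≤ d)) := by omega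
  rw [if_neg hc, if_pos h1]

lemma pv_alt_none (i size b d : Int) (text delim : String)
    (hb : pvClip size (PySem.Str.findFrom text "\\" i) = b)
    (hdl : pvClip size (PySem.Str.findFrom text delim i) = d)
    (h1 : b < 0) (h2 : d < 0) :
    skip_string_alt i size text delim = if i < size then size else i := by
  rw [pv_alt_unfold i size b d text delim hb hdl]
  have hc : ¬ (0 ≤ b ∧ (d < 0 ∨ b ≤ d)) := by omega
  have hc2 : ¬ (0 ≤ d) := by omega
  rw [if_neg hc, if_neg hc2]

lemma pv_main (text delim : String) (dc : Char) (hd : delim.toList = [dc])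
    (size : Int) (hsz : size ≤ (text.toList.length : Int)) :
    ∀ (n : Nat) (i : Int), 0 ≤ i → (size - i).toNat ≤ n →
      skip_string i size text delim = skip_string_alt i size text delim := by
  intro n
  induction n using Nat.strong_induction_on with
  | _ n ih =>
  intro i hi hn
  have hfb : ∀ j : Int, PySem.Str.findFrom text "\\" j = PySem.Chars.findFrom text.toList ['\\'] j none := by
    intro j
    rw [PySem.Str.findFrom_eq, show ("\\" : String).toList = ['\\'] from by decide]
  have hfd : ∀ j : Int, PySem.Str.findFrom text delim j = PySem.Chars.findFrom text.toList [dc] j none := by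
    intro j; rw [PySem.Str.findFrom_eq, hd]
  have hdelim : delim = String.ofList [dc] := by
    have h := String.ofList_toList (s := delim)
    rw [hd] at h
    exact h.symm
  by_cases hlt : i < size
  · -- scanning position inside [i, size)
    have hk : i.toNat < text.toList.length := by omega
    have hik : ((i.toNat : Int)) = i := Int.toNat_of_nonneg hi
    have hgetl : text.toList[i.toNat]? = some (text.toList[i.toNat]'hk) := List.getElem?_eq_getElem hk
    set c := text.toList[i.toNat]'hk with hc
    have hget : PySem.Str.pyGet? text i = some c := by
      rw [← hik, PySem.Str.pyGet?_natCast]; exact hgetl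
    rw [skip_string, dif_pos hlt]
    simp only [hget]
    have hn1 : 1 ≤ (size - i).toNat := by omega
    by_cases hbs : c = '\\'
    · -- escape: both jump to i + 2
      have hB0 : PySem.Chars.findFrom text.toList ['\\'] i none = i := by
        rw [← hik]
        exact pv_ff_hit _ _ _ hk (by rw [hgetl, hbs])
      have hclipb : pvClip size (PySem.Str.findFrom text "\\" i) = i := by
        rw [hfb, hB0]; exact pv_clip_in size i hi hlt
      have hdcases : pvClip size (PySem.Str.findFrom text delim i) < 0 ∨
          i ≤ pvClip size (PySem.Str.findFrom text delim i) := by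
        rw [hfd]
        by_cases hD : PySem.Chars.findFrom text.toList [dc] i none = -1
        · left; rw [hD, pv_clip_neg size (-1) (by omega)]; omega
        · have h1 := (pv_ff_lb _ _ _ hi hD).1
          unfold pvClip; split_ifs <;> omega
      rw [pv_alt_escape i size i (pvClip size (PySem.Str.findFrom text delim i)) text delim hclipb
            rfl hi hdcases (by omega)]
      have hAbs : String.ofList [c] = "\\" := by rw [hbs]
      rw [if_pos hAbs]
      exact ih (n - 1) (by omega) (i + 2) (by omega) (by omega)
    · have hAb : ¬ (String.ofList [c] = "\\") := by
        rw [show ("\\" : String) = String.ofList ['\\'] from rfl, pv_ofList_singleton_eq_iff]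
        exact hbs
      by_cases hdm : c = dc
      · -- delimiter: both return i + 1
        have hD0 : PySem.Chars.findFrom text.toList [dc] i none = i := by
          rw [← hik]
          exact pv_ff_hit _ _ _ hk (by rw [hgetl, hdm])
        have hclipd : pvClip size (PySem.Str.findFrom text delim i) = i := by
          rw [hfd, hD0]; exact pv_clip_in size i hi hlt
        have hbcases : pvClip size (PySem.Str.findFrom text "\\" i) < 0 ∨
            i < pvClip size (PySem.Str.findFrom text "\\" i) := by
          rw [hfb]
          by_cases hB : PySem.Chars.findFrom text.toList ['\\'] i none = -1
          · left; rw [hB, pv_clip_neg size (-1) (by omega)]; omega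
          · obtain ⟨hle, hpre⟩ := pv_ff_lb _ _ _ hi hB
            have hne2 : PySem.Chars.findFrom text.toList ['\\'] i none ≠ i := by
              intro he
              have hh := (pv_prefix_singleton_iff _ _).mp hpre
              rw [List.head?_drop, he, hgetl] at hh
              exact hbs (Option.some.inj hh)
            unfold pvClip; split_ifs <;> omega
        rw [pv_alt_delim i size (pvClip size (PySem.Str.findFrom text "\\" i)) i text delim rfl
              hclipd hi hbcases]
        have hAd : String.ofList [c] = delim := by
          rw [hdm, hdelim]
        rw [if_neg hAb, if_pos hAd]
      · -- ordinary character: A steps to i + 1; B's finds are unchanged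
        have hAd : ¬ (String.ofList [c] = delim) := by
          rw [hdelim, pv_ofList_singleton_eq_iff]
          exact hdm
        rw [if_neg hAb, if_neg hAd]
        rw [ih (n - 1) (by omega) (i + 1) (by omega) (by omega)]
        have hstepb : PySem.Chars.findFrom text.toList ['\\'] i none
            = PySem.Chars.findFrom text.toList ['\\'] (i + 1) none := by
          rw [← hik]
          exact pv_ff_step _ _ _ hk (by rw [hgetl]; intro h; exact hbs (Option.some.inj h))
        have hstepd : PySem.Chars.findFrom text.toList [dc] i none
            = PySem.Chars.findFrom text.toList [dc] (i + 1) none := by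
          rw [← hik]
          exact pv_ff_step _ _ _ hk (by rw [hgetl]; intro h; exact hdm (Option.some.inj h))
        have hbi : pvClip size (PySem.Str.findFrom text "\\" i)
            = pvClip size (PySem.Str.findFrom text "\\" (i + 1)) := by
          rw [hfb, hfb, hstepb]
        have hdi : pvClip size (PySem.Str.findFrom text delim i)
            = pvClip size (PySem.Str.findFrom text delim (i + 1)) := by
          rw [hfd, hfd, hstepd]
        by_cases hC : 0 ≤ pvClip size (PySem.Str.findFrom text "\\" (i + 1)) ∧
            (pvClip size (PySem.Str.findFrom text delim (i + 1)) < 0 ∨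
             pvClip size (PySem.Str.findFrom text "\\" (i + 1)) ≤
               pvClip size (PySem.Str.findFrom text delim (i + 1)))
        · -- escape branch on both sides
          obtain ⟨hbv, hb0, hbsz⟩ := pv_clip_nonneg size _ hC.1
          have hBne : PySem.Chars.findFrom text.toList ['\\'] i none ≠ -1 := by
            rw [hstepb]
            intro h
            rw [hfb, h] at hb0
            omega
          obtain ⟨hle, hpre⟩ := pv_ff_lb _ _ _ hi hBne
          have hne2 : PySem.Chars.findFrom text.toList ['\\'] i none ≠ i := by
            intro he
            have hh := (pv_prefix_singleton_iff _ _).mp hpre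
            rw [List.head?_drop, he, hgetl] at hh
            exact hbs (Option.some.inj hh)
          have hge : i + 1 ≤ pvClip size (PySem.Str.findFrom text "\\" (i + 1)) := by
            have hx : PySem.Str.findFrom text "\\" (i + 1)
                = PySem.Chars.findFrom text.toList ['\\'] i none := by
              rw [hfb, ← hstepb]
            omega
          rw [pv_alt_escape (i + 1) size _ _ text delim rfl rfl hC.1 hC.2 (by omega),
              pv_alt_escape i size _ _ text delim hbi hdi hC.1 hC.2 (by omega)]
        · by_cases hcd : 0 ≤ pvClip size (PySem.Str.findFrom text delim (i + 1))
          · -- delimiter branch on both sides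
            have h2 : pvClip size (PySem.Str.findFrom text "\\" (i + 1)) < 0 ∨
                pvClip size (PySem.Str.findFrom text delim (i + 1)) <
                  pvClip size (PySem.Str.findFrom text "\\" (i + 1)) := by omega
            rw [pv_alt_delim (i + 1) size _ _ text delim rfl rfl hcd h2,
                pv_alt_delim i size _ _ text delim hbi hdi hcd h2]
          · -- no special character below size on either side
            have hb1 : pvClip size (PySem.Str.findFrom text "\\" (i + 1)) < 0 := by omega
            have hd1 : pvClip size (PySem.Str.findFrom text delim (i + 1)) < 0 := by omega
            rw [pv_alt_none (i + 1) size _ _ text delim rfl rfl hb1 hd1,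
                pv_alt_none i size _ _ text delim hbi hdi hb1 hd1]
            rw [if_pos hlt]
            by_cases h1 : i + 1 < size
            · rw [if_pos h1]
            · rw [if_neg h1]; omega
  · -- i ≥ size: both return i unchanged
    rw [skip_string, dif_neg hlt]
    have clipneg : ∀ sub : List Char, pvClip size (PySem.Chars.findFrom text.toList sub i none) = -1 := by
      intro sub
      by_cases hN : PySem.Chars.findFrom text.toList sub i none = -1
      · rw [hN]; exact pv_clip_neg size (-1) (by omega)
      · have h1 := (pv_ff_lb _ _ _ hi hN).1
        exact pv_clip_neg size _ (by omega)
    rw [pv_alt_none i size (-1) (-1) text delim (by rw [hfb]; exact clipneg _)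
          (by rw [hfd]; exact clipneg _) (by omega) (by omega)]
    rw [if_neg hlt]

-- when size ≤ i the loop body never runs: A returns i, and both of B's finds clip to -1
lemma pv_high (text delim : String) (size i : Int) (hge : size ≤ i) :
    skip_string i size text delim = skip_string_alt i size text delim := by
  have hni : ¬ i < size := by omega
  rw [skip_string, dif_neg hni]
  have clipneg : ∀ sub : List Char, pvClip size (PySem.Chars.findFrom text.toList sub i none) = -1 := by
    intro sub
    by_cases hv : PySem.Chars.findFrom text.toList sub i none < 0
    · exact pv_clip_neg _ _ (Or.inl hv)
    · by_cases hi0 : 0 ≤ i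
      · have h1 := (pv_ff_lb text.toList sub i hi0 (by omega)).1
        exact pv_clip_neg _ _ (by omega)
      · exact pv_clip_neg _ _ (by omega)
  rw [pv_alt_none i size (-1) (-1) text delim
        (by rw [PySem.Str.findFrom_eq]; exact clipneg _)
        (by rw [PySem.Str.findFrom_eq]; exact clipneg _) (by omega) (by omega)]
  rw [if_neg hni]

-- ===== VERDICT (by name: the statement is the Claim_ definition above) =====
theorem skip_string_spec : Claim_equal_skip_string := by
  intro i size text delim _hdom hpre
  rcases hpre with ⟨hi, hsz, hlen⟩ | hge
  case inr => exact (pv_high text delim size i hge).symm ▸ rfl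
  obtain ⟨dc, hd⟩ : ∃ c, delim.toList = [c] := by
    cases h : delim.toList with
    | nil => simp [h] at hlen
    | cons a t => cases t with
      | nil => exact ⟨a, rfl⟩
      | cons b u => simp [h] at hlen
  exact (pv_main text delim dc hd size hsz (size - i).toNat i hi le_rfl).symm ▸ rfl
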